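-- pv_equiv track=rewrite | github.com/zobott-dot/Cubs-2026-Almanac | update_data.py | derive_abbr_from_name
-- ===== SOURCE A (Python) =====
-- NICKNAME_TO_ABBR = {
--     "Angels": "LAA", "Astros": "HOU", "Athletics": "ATH",
--     "Blue Jays": "TOR", "Braves": "ATL", "Brewers": "MIL",
--     "Cardinals": "STL", "Cubs": "CHC", "Diamondbacks": "AZ",
--     "Dodgers": "LAD", "Giants": "SF", "Guardians": "CLE",
--     "Mariners": "SEA", "Marlins": "MIA", "Mets": "NYM",
--     "Nationals": "WSH", "Orioles": "BAL", "Padres": "SD",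
--     "Phillies": "PHI", "Pirates": "PIT", "Rangers": "TEX",
--     "Rays": "TB", "Red Sox": "BOS", "Reds": "CIN",
--     "Rockies": "COL", "Royals": "KC", "Tigers": "DET",
--     "Twins": "MIN", "White Sox": "CWS", "Yankees": "NYY",
-- }
--
-- def derive_abbr_from_name(name: str) -> str:
--     """Best-effort abbreviation from a team name like 'Washington Nationals'."""
--     if not name:
--         return ""
--     # Try the full nickname-match first (handles "Red Sox", "Blue Jays", "White Sox")
--     for nickname, abbr in NICKNAME_TO_ABBR.items():
--         if name.endswith(nickname):
--             return abbr
--     # Fallback: uppercase first 3 letters of the last word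
--     parts = name.strip().split()
--     return parts[-1][:3].upper() if parts else ""
-- ===== SOURCE B (Python) =====
-- # Length-indexed suffix lookup: group nicknames by length, then one slice+dict
-- # lookup per distinct length instead of scanning all 30 entries with endswith.
-- BY_LEN = {
--     4: {"Cubs": "CHC", "Mets": "NYM", "Rays": "TB", "Reds": "CIN"},
--     5: {"Twins": "MIN"},
--     6: {"Angels": "LAA", "Astros": "HOU", "Braves": "ATL", "Giants": "SF",
--         "Padres": "SD", "Royals": "KC", "Tigers": "DET"},
--     7: {"Brewers": "MIL", "Dodgers": "LAD", "Marlins": "MIA", "Orioles": "BAL",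
--         "Pirates": "PIT", "Rangers": "TEX", "Red Sox": "BOS", "Rockies": "COL",
--         "Yankees": "NYY"},
--     8: {"Mariners": "SEA", "Phillies": "PHI"},
--     9: {"Athletics": "ATH", "Blue Jays": "TOR", "Cardinals": "STL",
--         "Guardians": "CLE", "Nationals": "WSH", "White Sox": "CWS"},
--     12: {"Diamondbacks": "AZ"},
-- }
--
-- def derive_abbr_from_name(name: str) -> str:
--     if not name:
--         return ""
--     for L, tbl in BY_LEN.items():
--         suffix = name[-L:]
--         if suffix in tbl:
--             return tbl[suffix]
--     parts = name.strip().split()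
--     return parts[-1][:3].upper() if parts else ""
-- ===== Notes on version B (the rewrite author's own statement) =====
-- stated objective: alternative
-- what changed: Replaces the 30-entry endswith scan with a precomputed length-indexed table: one slice + dict lookup per distinct nickname length (7 iterations instead of 30 suffix tests); identical empty-name guard and last-word fallback.
import Mathlib
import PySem

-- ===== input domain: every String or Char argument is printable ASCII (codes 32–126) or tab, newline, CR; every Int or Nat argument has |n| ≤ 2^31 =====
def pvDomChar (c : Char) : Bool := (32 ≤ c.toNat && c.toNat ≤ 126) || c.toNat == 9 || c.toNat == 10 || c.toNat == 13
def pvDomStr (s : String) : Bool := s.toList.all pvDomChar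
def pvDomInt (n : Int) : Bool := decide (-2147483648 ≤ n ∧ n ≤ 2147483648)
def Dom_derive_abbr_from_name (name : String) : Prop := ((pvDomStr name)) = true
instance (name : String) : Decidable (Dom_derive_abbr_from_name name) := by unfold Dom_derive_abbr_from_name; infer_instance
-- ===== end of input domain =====

-- B replaces A's 30-entry endswith scan with a length-indexed table (one slice +
-- dict lookup per distinct nickname length); same guard and fallback. Objective: alternative.

-- ===== PORT A =====
def pvTableA : List (String × String) :=
  [("Angels","LAA"),("Astros","HOU"),("Athletics","ATH"),("Blue Jays","TOR"),
   ("Braves","ATL"),("Brewers","MIL"),("Cardinals","STL"),("Cubs","CHC"),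
   ("Diamondbacks","AZ"),("Dodgers","LAD"),("Giants","SF"),("Guardians","CLE"),
   ("Mariners","SEA"),("Marlins","MIA"),("Mets","NYM"),("Nationals","WSH"),
   ("Orioles","BAL"),("Padres","SD"),("Phillies","PHI"),("Pirates","PIT"),
   ("Rangers","TEX"),("Rays","TB"),("Red Sox","BOS"),("Reds","CIN"),
   ("Rockies","COL"),("Royals","KC"),("Tigers","DET"),("Twins","MIN"),
   ("White Sox","CWS"),("Yankees","NYY")]

-- the 'for nickname, abbr in NICKNAME_TO_ABBR.items(): if name.endswith(nickname): return abbr' loop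
def pvScanA (name : String) : List (String × String) → Option String
  | [] => none
  | (nick, abbr) :: rest =>
      if PySem.Str.endswith name nick then some abbr else pvScanA name rest

-- parts = name.strip().split(); return parts[-1][:3].upper() if parts else ""
def pvFallbackA (name : String) : String :=
  let parts := PySem.Str.split₀ (PySem.Str.strip name)
  if parts ≠ [] then
    PySem.Str.upper (PySem.Str.slice ((PySem.List.pyGet? parts (-1)).getD "") none (some 3))
  else ""

def derive_abbr_from_name (name : String) : String :=
  if name = "" then ""
  else
    match pvScanA name pvTableA with
    | some abbr => abbr
    | none => pvFallbackA name

-- ===== PORT B =====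
def pvByLen : List (Int × PySem.Dict String String) :=
  [(4, PySem.Dict.mk [("Cubs","CHC"),("Mets","NYM"),("Rays","TB"),("Reds","CIN")]),
   (5, PySem.Dict.mk [("Twins","MIN")]),
   (6, PySem.Dict.mk [("Angels","LAA"),("Astros","HOU"),("Braves","ATL"),("Giants","SF"),
                      ("Padres","SD"),("Royals","KC"),("Tigers","DET")]),
   (7, PySem.Dict.mk [("Brewers","MIL"),("Dodgers","LAD"),("Marlins","MIA"),("Orioles","BAL"),
                      ("Pirates","PIT"),("Rangers","TEX"),("Red Sox","BOS"),("Rockies","COL"),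
                      ("Yankees","NYY")]),
   (8, PySem.Dict.mk [("Mariners","SEA"),("Phillies","PHI")]),
   (9, PySem.Dict.mk [("Athletics","ATH"),("Blue Jays","TOR"),("Cardinals","STL"),
                      ("Guardians","CLE"),("Nationals","WSH"),("White Sox","CWS")]),
   (12, PySem.Dict.mk [("Diamondbacks","AZ")])]

-- the 'for L, tbl in BY_LEN.items(): suffix = name[-L:]; if suffix in tbl: return tbl[suffix]' loop
def pvScanB (name : String) : List (Int × PySem.Dict String String) → Option String
  | [] => none
  | (L, tbl) :: rest =>
      let suffix := PySem.Str.slice name (some (-L)) none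
      match PySem.Dict.get? tbl suffix with
      | some abbr => some abbr
      | none => pvScanB name rest

-- parts = name.strip().split(); return parts[-1][:3].upper() if parts else ""
def pvFallbackB (name : String) : String :=
  let parts := PySem.Str.split₀ (PySem.Str.strip name)
  if parts ≠ [] then
    PySem.Str.upper (PySem.Str.slice ((PySem.List.pyGet? parts (-1)).getD "") none (some 3))
  else ""

def derive_abbr_from_name_alt (name : String) : String :=
  if name = "" then ""
  else
    match pvScanB name pvByLen with
    | some abbr => abbr
    | none => pvFallbackB name

-- ===== PRECONDITION & SPEC =====
def Spec_derive_abbr_from_name (name : String) (out : String) : Prop := out = derive_abbr_from_name_alt name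
instance (name : String) (out : String) : Decidable (Spec_derive_abbr_from_name name out) := by unfold Spec_derive_abbr_from_name; infer_instance

-- ===== CLAIM (what is proved, stated in full; the proofs are below) =====
def Claim_equal_derive_abbr_from_name : Prop := ∀ (name : String), Dom_derive_abbr_from_name name → Spec_derive_abbr_from_name name (derive_abbr_from_name name)

-- ===== LEMMAS AND PROOFS =====

-- A's scan is a first-match search over the table
theorem pvScanA_eq_find? (name : String) (l : List (String × String)) :
    pvScanA name l
      = (l.find? (fun p => PySem.Str.endswith name p.1)).map Prod.snd := by
  induction l with
  | nil => simp [pvScanA]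
  | cons hd tl ih =>
    obtain ⟨nick, abbr⟩ := hd
    simp only [pvScanA, ih, List.find?_cons]
    cases h : PySem.Str.endswith name nick <;> simp [h]

-- name[-L:] == nick  ↔  name.endswith(nick), when len(nick) = L > 0
theorem pvSlice_eq_iff (name nick : String) (L : Nat) (hL : 0 < L)
    (hlen : nick.toList.length = L) :
    (PySem.Str.slice name (some (-(L : Int))) none = nick)
      ↔ PySem.Str.endswith name nick = true := by
  rw [← String.toList_inj, PySem.Str.toList_slice, PySem.Chars.slice_eq_listSlice,
      PySem.List.slice_from_neg_natCast name.toList L hL]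
  rw [show PySem.Str.endswith name nick = PySem.Chars.endswith name.toList nick.toList from by simp,
      PySem.Chars.endswith_iff]
  constructor
  · intro h; rw [← h]; exact List.drop_suffix _ _
  · rintro ⟨t, ht⟩
    rw [← ht, List.length_append, hlen]
    simp

-- lookup of name[-L:] in a dict whose keys all have length L is the endswith-first-match
theorem pvGroupStep (name : String) (L : Int) (hL : 0 < L)
    (entries : List (String × String))
    (hlen : ∀ p ∈ entries, (p.1.toList.length : Int) = L) :
    PySem.Dict.get? (PySem.Dict.mk entries) (PySem.Str.slice name (some (-L)) none)
      = (entries.find? (fun p => PySem.Str.endswith name p.1)).map Prod.snd := by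
  obtain ⟨K, rfl⟩ : ∃ K : Nat, L = (K : Int) := ⟨L.toNat, (Int.toNat_of_nonneg hL.le).symm⟩
  have hK : 0 < K := by exact_mod_cast hL
  induction entries with
  | nil => rfl
  | cons hd tl ih =>
    obtain ⟨k, v⟩ := hd
    have hk : k.toList.length = K := by
      have := hlen (k, v) (by simp); exact_mod_cast this
    rw [PySem.Dict.get?_mk_cons, List.find?_cons]
    by_cases h : PySem.Str.endswith name k = true
    · have hs : PySem.Str.slice name (some (-(K : Int))) none = k :=
        (pvSlice_eq_iff name k K hK hk).mpr h
      have hc : PySem.Chars.endswith name.toList k.toList = true := by simpa using h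
      simp [hc, hs]
    · have hs : PySem.Str.slice name (some (-(K : Int))) none ≠ k :=
        fun e => h ((pvSlice_eq_iff name k K hK hk).mp e)
      have hbe : (k == PySem.Str.slice name (some (-(K : Int))) none) = false := by
        simp only [beq_eq_false_iff_ne, ne_eq]
        exact fun e => hs e.symm
      rw [if_neg (by simp [hbe])]
      have h'' : PySem.Str.endswith name k = false := by
        rw [Bool.eq_false_iff]; exact h
      simp only [h'']
      exact ih (fun p hp => hlen p (List.mem_cons_of_mem _ hp))

-- first match is invariant under permutation when at most one element matches
theorem pvFind?_perm_of_unique {α : Type} (p : α → Bool) (l1 l2 : List α)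
    (hperm : l1.Perm l2)
    (huniq : ∀ a ∈ l1, ∀ b ∈ l1, p a = true → p b = true → a = b) :
    l1.find? p = l2.find? p := by
  cases h1 : l1.find? p with
  | none =>
    symm
    rw [List.find?_eq_none] at h1 ⊢
    intro x hx; exact h1 x (hperm.mem_iff.mpr hx)
  | some a =>
    have ha := List.find?_some h1
    have hmem := List.mem_of_find?_eq_some h1
    cases h2 : l2.find? p with
    | none =>
      rw [List.find?_eq_none] at h2
      exact absurd ha (by simpa using h2 a (hperm.mem_iff.mp hmem))
    | some b =>
      have hb := List.find?_some h2
      have hmemb := hperm.mem_iff.mpr (List.mem_of_find?_eq_some h2)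
      rw [huniq a hmem b hmemb ha hb]

theorem pvOr_map {α β : Type} (f : α → β) (a b : Option α) :
    (a.or b).map f = (a.map f).or (b.map f) := by cases a <;> rfl

theorem pvFind?_append {α : Type} (p : α → Bool) (l1 l2 : List α) :
    (l1 ++ l2).find? p = (l1.find? p).or (l2.find? p) := by
  induction l1 with
  | nil => simp
  | cons a t ih => cases h : p a <;> simp [h, ih]

-- one step of B's loop: lookup in one length-group, else continue
theorem pvScanB_cons (name : String) (L : Int) (hL : 0 < L)
    (entries : List (String × String))
    (hlen : ∀ p ∈ entries, (p.1.toList.length : Int) = L)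
    (rest : List (Int × PySem.Dict String String)) :
    pvScanB name ((L, PySem.Dict.mk entries) :: rest)
      = ((entries.find? (fun p => PySem.Str.endswith name p.1)).map Prod.snd).or
          (pvScanB name rest) := by
  simp only [pvScanB]
  rw [pvGroupStep name L hL entries hlen]
  cases entries.find? (fun p => PySem.Str.endswith name p.1) <;> rfl

def pvFlatB : List (String × String) :=
  [("Cubs","CHC"),("Mets","NYM"),("Rays","TB"),("Reds","CIN"),
   ("Twins","MIN"),
   ("Angels","LAA"),("Astros","HOU"),("Braves","ATL"),("Giants","SF"),
   ("Padres","SD"),("Royals","KC"),("Tigers","DET"),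
   ("Brewers","MIL"),("Dodgers","LAD"),("Marlins","MIA"),("Orioles","BAL"),
   ("Pirates","PIT"),("Rangers","TEX"),("Red Sox","BOS"),("Rockies","COL"),
   ("Yankees","NYY"),
   ("Mariners","SEA"),("Phillies","PHI"),
   ("Athletics","ATH"),("Blue Jays","TOR"),("Cardinals","STL"),
   ("Guardians","CLE"),("Nationals","WSH"),("White Sox","CWS"),
   ("Diamondbacks","AZ")]

theorem pvScanB_eq_find? (name : String) :
    pvScanB name pvByLen
      = (pvFlatB.find? (fun p => PySem.Str.endswith name p.1)).map Prod.snd := by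
  have hsplit : pvFlatB
      = [("Cubs","CHC"),("Mets","NYM"),("Rays","TB"),("Reds","CIN")]
        ++ ([("Twins","MIN")]
        ++ ([("Angels","LAA"),("Astros","HOU"),("Braves","ATL"),("Giants","SF"),
             ("Padres","SD"),("Royals","KC"),("Tigers","DET")]
        ++ ([("Brewers","MIL"),("Dodgers","LAD"),("Marlins","MIA"),("Orioles","BAL"),
             ("Pirates","PIT"),("Rangers","TEX"),("Red Sox","BOS"),("Rockies","COL"),
             ("Yankees","NYY")]
        ++ ([("Mariners","SEA"),("Phillies","PHI")]
        ++ ([("Athletics","ATH"),("Blue Jays","TOR"),("Cardinals","STL"),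
             ("Guardians","CLE"),("Nationals","WSH"),("White Sox","CWS")]
        ++ [("Diamondbacks","AZ")]))))) := rfl
  rw [hsplit]
  simp only [pvByLen]
  rw [pvScanB_cons name 4 (by norm_num) _ (by decide),
      pvScanB_cons name 5 (by norm_num) _ (by decide),
      pvScanB_cons name 6 (by norm_num) _ (by decide),
      pvScanB_cons name 7 (by norm_num) _ (by decide),
      pvScanB_cons name 8 (by norm_num) _ (by decide),
      pvScanB_cons name 9 (by norm_num) _ (by decide),
      pvScanB_cons name 12 (by norm_num) _ (by decide)]
  simp only [pvFind?_append, pvOr_map, pvScanB]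
  simp [Option.or_none]

-- no nickname in the table is a suffix of another: at most one endswith match
theorem pvUniq (name : String) :
    ∀ a ∈ pvTableA, ∀ b ∈ pvTableA,
      PySem.Str.endswith name a.1 = true → PySem.Str.endswith name b.1 = true → a = b := by
  intro a ha b hb hpa hpb
  have hsa : a.1.toList <:+ name.toList := (PySem.Chars.endswith_iff _ _).mp (by simpa using hpa)
  have hsb : b.1.toList <:+ name.toList := (PySem.Chars.endswith_iff _ _).mp (by simpa using hpb)
  have hns : ∀ x ∈ pvTableA, ∀ y ∈ pvTableA, x.1.toList <:+ y.1.toList → x = y := by decide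
  rcases List.suffix_or_suffix_of_suffix hsa hsb with h | h
  · exact hns a ha b hb h
  · exact (hns b hb a ha h).symm

theorem pvScanAB (name : String) : pvScanA name pvTableA = pvScanB name pvByLen := by
  rw [pvScanA_eq_find?, pvScanB_eq_find?]
  rw [pvFind?_perm_of_unique _ pvTableA pvFlatB (by decide) (pvUniq name)]

-- ===== VERDICT (by name: the statement is the Claim_ definition above) =====
theorem derive_abbr_from_name_spec : Claim_equal_derive_abbr_from_name := by
  intro name _
  unfold Spec_derive_abbr_from_name derive_abbr_from_name derive_abbr_from_name_alt
  rw [pvScanAB]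
  rfl
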